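-- pv_equiv track=rewrite | github.com/Konyakoff/ArmeykaBrain | app/services/heygen_service.py | translate_avatar_name
-- ===== SOURCE A (Python) =====
-- def translate_avatar_name(name: str, gender: str) -> str:
--     """Переводит и форматирует имя аватара для удобного отображения."""
--     gender_ru = "жен." if gender == "female" else "муж." if gender == "male" else ""
--
--     desc = name
--     # Базовые переводы окружения и одежды
--     translations = {
--         "Upper Body": "По пояс",
--         "Office Front": "Офис, анфас",
--         "Office Side": "Офис, сбоку",
--         "Sofa Front": "На диване, анфас",
--         "Sofa Side": "На диване, сбоку",
--         "in Brown blazer": "в коричневом пиджаке",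
--         "in Blue blazer": "в синем пиджаке",
--         "in Beige blazer": "в бежевом пиджаке",
--         "in Black blazer": "в черном пиджаке",
--         "in Blue shirt": "в синей рубашке",
--         "in White shirt": "в белой рубашке",
--         "in Black shirt": "в черной рубашке",
--         "in Blue t-shirt": "в синей футболке",
--         "in Black t-shirt": "в черной футболке",
--         "in White t-shirt": "в белой футболке",
--         "in Grey t-shirt": "в серой футболке",
--         "in Grey sweater": "в сером свитере",
--         "in Black sweater": "в черном свитере"
--     }
--
--     for eng, ru in translations.items():
--         desc = desc.replace(eng, ru)
--
--     # Очищаем от лишних скобок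
--     desc = desc.replace("(", "").replace(")", "").strip()
--
--     # Пытаемся вычленить имя (обычно идет первым словом)
--     parts = desc.split(" ", 1)
--     if len(parts) > 1:
--         first_name = parts[0]
--         rest = parts[1]
--         return f"{first_name} ({gender_ru}, {rest})"
--
--     return f"{desc} ({gender_ru})"
-- ===== SOURCE B (Python) =====
-- def translate_avatar_name(name: str, gender: str) -> str:
--     """Single left-to-right scan with a first-match phrase table instead of 18 sequential full-string replace passes."""
--     gender_ru = "жен." if gender == "female" else "муж." if gender == "male" else ""
--     table = [
--         ("Upper Body", "По пояс"),
--         ("Office Front", "Офис, анфас"),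
--         ("Office Side", "Офис, сбоку"),
--         ("Sofa Front", "На диване, анфас"),
--         ("Sofa Side", "На диване, сбоку"),
--         ("in Brown blazer", "в коричневом пиджаке"),
--         ("in Blue blazer", "в синем пиджаке"),
--         ("in Beige blazer", "в бежевом пиджаке"),
--         ("in Black blazer", "в черном пиджаке"),
--         ("in Blue shirt", "в синей рубашке"),
--         ("in White shirt", "в белой рубашке"),
--         ("in Black shirt", "в черной рубашке"),
--         ("in Blue t-shirt", "в синей футболке"),
--         ("in Black t-shirt", "в черной футболке"),
--         ("in White t-shirt", "в белой футболке"),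
--         ("in Grey t-shirt", "в серой футболке"),
--         ("in Grey sweater", "в сером свитере"),
--         ("in Black sweater", "в черном свитере"),
--     ]
--     out = []
--     i = 0
--     n = len(name)
--     while i < n:
--         for eng, ru in table:
--             if name.startswith(eng, i):
--                 out.append(ru)
--                 i += len(eng)
--                 break
--         else:
--             out.append(name[i])
--             i += 1
--     desc = "".join(out).replace("(", "").replace(")", "").strip()
--     parts = desc.split(" ", 1)
--     if len(parts) > 1:
--         return f"{parts[0]} ({gender_ru}, {parts[1]})"
--     return f"{desc} ({gender_ru})"
-- ===== Notes on version B (the rewrite author's own statement) =====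
-- stated objective: alternative
-- what changed: Replaced the 18 sequential full-string replace passes by a single left-to-right scan that at each position tries the phrase table in order (first match wins) and emits either the translation or the character; the paren-stripping, strip and first-space split that follow are unchanged.
import Mathlib
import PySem

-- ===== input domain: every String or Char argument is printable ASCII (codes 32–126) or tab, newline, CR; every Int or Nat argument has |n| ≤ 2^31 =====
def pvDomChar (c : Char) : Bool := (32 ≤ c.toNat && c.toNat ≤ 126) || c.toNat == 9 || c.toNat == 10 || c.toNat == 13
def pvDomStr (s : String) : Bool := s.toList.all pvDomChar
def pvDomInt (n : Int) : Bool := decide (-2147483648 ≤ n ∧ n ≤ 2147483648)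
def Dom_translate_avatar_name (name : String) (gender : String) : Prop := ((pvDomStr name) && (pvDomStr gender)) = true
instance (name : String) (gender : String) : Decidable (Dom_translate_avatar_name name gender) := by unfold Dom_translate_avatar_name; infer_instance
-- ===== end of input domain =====

-- B replaces A's 18 sequential full-string replace passes by one left-to-right scan with a
-- first-match phrase table (objective: alternative; the formatting tail is unchanged).
-- ===== PORT A =====
def translate_avatar_name (name : String) (gender : String) : String :=
  let gender_ru : String := if gender == "female" then "жен." else if gender == "male" then "муж." else ""
  let translations : PySem.Dict String String := PySem.Dict.ofList
    [ ("Upper Body", "По пояс"),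
      ("Office Front", "Офис, анфас"),
      ("Office Side", "Офис, сбоку"),
      ("Sofa Front", "На диване, анфас"),
      ("Sofa Side", "На диване, сбоку"),
      ("in Brown blazer", "в коричневом пиджаке"),
      ("in Blue blazer", "в синем пиджаке"),
      ("in Beige blazer", "в бежевом пиджаке"),
      ("in Black blazer", "в черном пиджаке"),
      ("in Blue shirt", "в синей рубашке"),
      ("in White shirt", "в белой рубашке"),
      ("in Black shirt", "в черной рубашке"),
      ("in Blue t-shirt", "в синей футболке"),
      ("in Black t-shirt", "в черной футболке"),
      ("in White t-shirt", "в белой футболке"),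
      ("in Grey t-shirt", "в серой футболке"),
      ("in Grey sweater", "в сером свитере"),
      ("in Black sweater", "в черном свитере") ]
  let desc := translations.items.foldl (fun d p => PySem.Str.replace d p.1 p.2) name
  let desc := PySem.Str.strip (PySem.Str.replace (PySem.Str.replace desc "(" "") ")" "")
  let parts := (PySem.Str.splitMax? desc " " 1).getD []
  match parts with
  | first_name :: rest :: _ => first_name ++ " (" ++ gender_ru ++ ", " ++ rest ++ ")"
  | _ => desc ++ " (" ++ gender_ru ++ ")"

-- ===== PORT B =====
def pvTableB : List (List Char × List Char) :=
  [ (['U', 'p', 'p', 'e', 'r', ' ', 'B', 'o', 'd', 'y'],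
     ['П', 'о', ' ', 'п', 'о', 'я', 'с']),
    (['O', 'f', 'f', 'i', 'c', 'e', ' ', 'F', 'r', 'o', 'n', 't'],
     ['О', 'ф', 'и', 'с', ',', ' ', 'а', 'н', 'ф', 'а', 'с']),
    (['O', 'f', 'f', 'i', 'c', 'e', ' ', 'S', 'i', 'd', 'e'],
     ['О', 'ф', 'и', 'с', ',', ' ', 'с', 'б', 'о', 'к', 'у']),
    (['S', 'o', 'f', 'a', ' ', 'F', 'r', 'o', 'n', 't'],
     ['Н', 'а', ' ', 'д', 'и', 'в', 'а', 'н', 'е', ',', ' ', 'а', 'н', 'ф', 'а', 'с']),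
    (['S', 'o', 'f', 'a', ' ', 'S', 'i', 'd', 'e'],
     ['Н', 'а', ' ', 'д', 'и', 'в', 'а', 'н', 'е', ',', ' ', 'с', 'б', 'о', 'к', 'у']),
    (['i', 'n', ' ', 'B', 'r', 'o', 'w', 'n', ' ', 'b', 'l', 'a', 'z', 'e', 'r'],
     ['в', ' ', 'к', 'о', 'р', 'и', 'ч', 'н', 'е', 'в', 'о', 'м', ' ', 'п', 'и', 'д', 'ж', 'а', 'к', 'е']),
    (['i', 'n', ' ', 'B', 'l', 'u', 'e', ' ', 'b', 'l', 'a', 'z', 'e', 'r'],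
     ['в', ' ', 'с', 'и', 'н', 'е', 'м', ' ', 'п', 'и', 'д', 'ж', 'а', 'к', 'е']),
    (['i', 'n', ' ', 'B', 'e', 'i', 'g', 'e', ' ', 'b', 'l', 'a', 'z', 'e', 'r'],
     ['в', ' ', 'б', 'е', 'ж', 'е', 'в', 'о', 'м', ' ', 'п', 'и', 'д', 'ж', 'а', 'к', 'е']),
    (['i', 'n', ' ', 'B', 'l', 'a', 'c', 'k', ' ', 'b', 'l', 'a', 'z', 'e', 'r'],
     ['в', ' ', 'ч', 'е', 'р', 'н', 'о', 'м', ' ', 'п', 'и', 'д', 'ж', 'а', 'к', 'е']),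
    (['i', 'n', ' ', 'B', 'l', 'u', 'e', ' ', 's', 'h', 'i', 'r', 't'],
     ['в', ' ', 'с', 'и', 'н', 'е', 'й', ' ', 'р', 'у', 'б', 'а', 'ш', 'к', 'е']),
    (['i', 'n', ' ', 'W', 'h', 'i', 't', 'e', ' ', 's', 'h', 'i', 'r', 't'],
     ['в', ' ', 'б', 'е', 'л', 'о', 'й', ' ', 'р', 'у', 'б', 'а', 'ш', 'к', 'е']),
    (['i', 'n', ' ', 'B', 'l', 'a', 'c', 'k', ' ', 's', 'h', 'i', 'r', 't'],
     ['в', ' ', 'ч', 'е', 'р', 'н', 'о', 'й', ' ', 'р', 'у', 'б', 'а', 'ш', 'к', 'е']),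
    (['i', 'n', ' ', 'B', 'l', 'u', 'e', ' ', 't', '-', 's', 'h', 'i', 'r', 't'],
     ['в', ' ', 'с', 'и', 'н', 'е', 'й', ' ', 'ф', 'у', 'т', 'б', 'о', 'л', 'к', 'е']),
    (['i', 'n', ' ', 'B', 'l', 'a', 'c', 'k', ' ', 't', '-', 's', 'h', 'i', 'r', 't'],
     ['в', ' ', 'ч', 'е', 'р', 'н', 'о', 'й', ' ', 'ф', 'у', 'т', 'б', 'о', 'л', 'к', 'е']),
    (['i', 'n', ' ', 'W', 'h', 'i', 't', 'e', ' ', 't', '-', 's', 'h', 'i', 'r', 't'],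
     ['в', ' ', 'б', 'е', 'л', 'о', 'й', ' ', 'ф', 'у', 'т', 'б', 'о', 'л', 'к', 'е']),
    (['i', 'n', ' ', 'G', 'r', 'e', 'y', ' ', 't', '-', 's', 'h', 'i', 'r', 't'],
     ['в', ' ', 'с', 'е', 'р', 'о', 'й', ' ', 'ф', 'у', 'т', 'б', 'о', 'л', 'к', 'е']),
    (['i', 'n', ' ', 'G', 'r', 'e', 'y', ' ', 's', 'w', 'e', 'a', 't', 'e', 'r'],
     ['в', ' ', 'с', 'е', 'р', 'о', 'м', ' ', 'с', 'в', 'и', 'т', 'е', 'р', 'е']),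
    (['i', 'n', ' ', 'B', 'l', 'a', 'c', 'k', ' ', 's', 'w', 'e', 'a', 't', 'e', 'r'],
     ['в', ' ', 'ч', 'е', 'р', 'н', 'о', 'м', ' ', 'с', 'в', 'и', 'т', 'е', 'р', 'е']) ]

-- keys of the scan table are nonempty (cited by pvScanB's termination proof)
theorem pvTableB_key_ne : ∀ p ∈ pvTableB, p.1 ≠ [] := by decide

-- the while/for scan of Source B: at each position, first table key that matches is emitted
def pvScanB : List Char → List Char
  | [] => []
  | c :: t =>
    match h : pvTableB.find? (fun p => p.1.isPrefixOf (c :: t)) with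
    | some p => p.2 ++ pvScanB ((c :: t).drop p.1.length)
    | none => c :: pvScanB t
termination_by s => s.length
decreasing_by
  · have hmem := List.mem_of_find?_eq_some h
    have hne := pvTableB_key_ne _ hmem
    have : 1 ≤ p.1.length := by
      cases hp : p.1 with
      | nil => exact absurd hp hne
      | cons a l => simp
    simp only [List.length_drop, List.length_cons]
    omega
  · simp

def translate_avatar_name_alt (name : String) (gender : String) : String :=
  let gender_ru : String := if gender == "female" then "жен." else if gender == "male" then "муж." else ""
  let desc := String.ofList (pvScanB name.toList)
  let desc := PySem.Str.strip (PySem.Str.replace (PySem.Str.replace desc "(" "") ")" "")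
  let parts := (PySem.Str.splitMax? desc " " 1).getD []
  if 1 < parts.length then
    parts.getD 0 "" ++ " (" ++ gender_ru ++ ", " ++ parts.getD 1 "" ++ ")"
  else desc ++ " (" ++ gender_ru ++ ")"

-- ===== PRECONDITION & SPEC =====
def Spec_translate_avatar_name (name : String) (gender : String) (out : String) : Prop := out = translate_avatar_name_alt name gender
instance (name : String) (gender : String) (out : String) : Decidable (Spec_translate_avatar_name name gender out) := by unfold Spec_translate_avatar_name; infer_instance

-- ===== CLAIM (what is proved, stated in full; the proofs are below) =====
def Claim_equal_translate_avatar_name : Prop := ∀ (name : String) (gender : String), Dom_translate_avatar_name name gender → Spec_translate_avatar_name name gender (translate_avatar_name name gender)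

-- ===== LEMMAS AND PROOFS =====

-- ===== VERDICT (by name: the statement is the Claim_ definition above) =====

-- ---------- proof machinery: a faithful model of str.replace ----------

-- structural model of CPython's left-to-right non-overlapping replace (old ≠ "")
def pvRepl (old new : List Char) : List Char → List Char
  | [] => []
  | c :: t =>
    if old ≠ [] ∧ old.isPrefixOf (c :: t)
    then new ++ pvRepl old new ((c :: t).drop old.length)
    else c :: pvRepl old new t
termination_by s => s.length
decreasing_by
  · rename_i h
    obtain ⟨hne, -⟩ := h
    have : 1 ≤ old.length := by cases ho : old with
      | nil => exact absurd ho hne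
      | cons a l => simp
    simp only [List.length_drop, List.length_cons]
    omega
  · simp

theorem pvRepl_go (old new : List Char) (hne : old ≠ []) :
    ∀ (fuel : Nat) (l acc : List Char), l.length ≤ fuel →
      PySem.Chars.replace.go old new fuel l acc = acc.reverse ++ pvRepl old new l := by
  intro fuel
  induction fuel with
  | zero =>
    intro l acc hl
    have : l = [] := List.eq_nil_of_length_eq_zero (Nat.le_zero.mp hl)
    subst this
    simp [PySem.Chars.replace.go, pvRepl]
  | succ n ih =>
    intro l acc hl
    cases l with
    | nil => simp [PySem.Chars.replace.go, pvRepl]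
    | cons c t =>
      by_cases hp : old.isPrefixOf (c :: t)
      · have h1 : 1 ≤ old.length := by
          cases ho : old with
          | nil => exact absurd ho hne
          | cons a l' => simp
        rw [show PySem.Chars.replace.go old new (n+1) (c :: t) acc
              = PySem.Chars.replace.go old new n ((c :: t).drop old.length) (new.reverse ++ acc) by
            simp [PySem.Chars.replace.go, hp]]
        rw [ih _ _ (by simp only [List.length_drop, List.length_cons]; simp at hl; omega)]
        rw [show pvRepl old new (c :: t) = new ++ pvRepl old new ((c :: t).drop old.length) by
            rw [pvRepl]; simp [hne, hp]]
        simp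
      · rw [show PySem.Chars.replace.go old new (n+1) (c :: t) acc
              = PySem.Chars.replace.go old new n t (c :: acc) by
            simp [PySem.Chars.replace.go, hp]]
        rw [ih _ _ (by simp at hl ⊢; omega)]
        rw [show pvRepl old new (c :: t) = c :: pvRepl old new t by
            rw [pvRepl]; simp [hp]]
        simp

theorem pvRepl_eq_replace (old new s : List Char) (hne : old ≠ []) :
    PySem.Chars.replace s old new = pvRepl old new s := by
  rw [PySem.Chars.replace]
  rw [if_neg (by simp [List.isEmpty_iff, hne])]
  simpa using pvRepl_go old new hne s.length s [] le_rfl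

theorem pvRepl_nil (old new : List Char) : pvRepl old new [] = [] := by rw [pvRepl]

theorem pvRepl_pos (old new s : List Char) (hne : old ≠ []) (hp : old <+: s) :
    pvRepl old new s = new ++ pvRepl old new (s.drop old.length) := by
  cases s with
  | nil =>
    have : old = [] := List.prefix_nil.mp hp
    exact absurd this hne
  | cons c t =>
    rw [pvRepl]
    simp [hne, List.isPrefixOf_iff_prefix.mpr hp]

theorem pvRepl_neg (old new : List Char) (c : Char) (t : List Char) (hp : ¬ old <+: (c :: t)) :
    pvRepl old new (c :: t) = c :: pvRepl old new t := by
  rw [pvRepl, if_neg]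
  rintro ⟨-, h⟩
  exact hp (List.isPrefixOf_iff_prefix.mp h)

-- replace skips over a block containing no occurrence of the key's first character
theorem pvRepl_pass (kh : Char) (kt new : List Char) :
    ∀ (b X : List Char), kh ∉ b →
      pvRepl (kh :: kt) new (b ++ X) = b ++ pvRepl (kh :: kt) new X := by
  intro b
  induction b with
  | nil => simp
  | cons c b' ih =>
    intro X hnb
    have hc : kh ≠ c := by simp at hnb; exact hnb.1
    rw [List.cons_append, pvRepl_neg _ _ _ _ (by
      intro h
      exact hc (List.cons_prefix_cons.mp h).1)]
    rw [ih X (by simp at hnb; exact hnb.2)]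
    simp

-- ---------- marked segments: raw chars vs inert replacement blocks ----------

abbrev pvItem := Sum Char (List Char)

def pvFlat (m : List pvItem) : List Char :=
  m.flatMap fun x => Sum.elim (fun c => [c]) id x

def pvRawPrefix : List Char → List pvItem → Bool
  | [], _ => true
  | _ :: _, [] => false
  | c :: k, Sum.inl c' :: m => c == c' && pvRawPrefix k m
  | _ :: _, Sum.inr _ :: _ => false

def pvDropRaw : Nat → List pvItem → List pvItem
  | 0, m => m
  | _ + 1, [] => []
  | n + 1, _ :: m => pvDropRaw n m

theorem pvDropRaw_length_le (n : Nat) (m : List pvItem) : (pvDropRaw n m).length ≤ m.length := by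
  induction n generalizing m with
  | zero => simp [pvDropRaw]
  | succ k ih =>
    cases m with
    | nil => simp [pvDropRaw]
    | cons x m' => exact le_trans (ih m') (by simp)

def pvSRepl (k r : List Char) : List pvItem → List pvItem
  | [] => []
  | x :: m =>
    if k ≠ [] ∧ pvRawPrefix k (x :: m) = true
    then Sum.inr r :: pvSRepl k r (pvDropRaw k.length (x :: m))
    else x :: pvSRepl k r m
termination_by m => m.length
decreasing_by
  · rename_i h
    obtain ⟨hne, _⟩ := h
    cases hk : k with
    | nil => exact absurd hk hne
    | cons a l =>
      calc (pvDropRaw (a :: l).length (x :: m)).length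
          = (pvDropRaw l.length m).length := by simp [pvDropRaw]
        _ ≤ m.length := pvDropRaw_length_le _ _
        _ < (x :: m).length := by simp
  · simp

def pvFoldS (T : List (List Char × List Char)) (m : List pvItem) : List pvItem :=
  T.foldl (fun m p => pvSRepl p.1 p.2 m) m

def pvGood (m : List pvItem) : Prop :=
  ∀ r : List Char, Sum.inr r ∈ m → r ∈ pvTableB.map (·.2)

def pvReflects (t : List Char) (m : List pvItem) : Prop :=
  ∀ k : List Char, pvRawPrefix k m = true → k <+: t

-- ---------- finite facts about the fixed table (kernel-checked) ----------

theorem pvFactKeyB : pvTableB.all (fun p => !(p.1.isEmpty) && p.1.all (fun c => decide (c.toNat < 128))) = true := by rfl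
theorem pvFactReplB : (pvTableB.map (·.2)).all (fun r => (!(r.isEmpty) && decide (128 ≤ r.headI.toNat)) && pvTableB.all (fun p => !(r.contains p.1.headI))) = true := by rfl
theorem pvFactOverlapB : pvTableB.all (fun p => pvTableB.all (fun q => (List.range p.1.length).all (fun pos => (pos == 0) || (!(q.1.isPrefixOf (p.1.drop pos)) && !((p.1.drop pos).isPrefixOf q.1))))) = true := by rfl

theorem pvFactKey : ∀ p ∈ pvTableB, p.1 ≠ [] ∧ ∀ c ∈ p.1, c.toNat < 128 := by
  intro p hp
  have h := List.all_eq_true.mp pvFactKeyB p hp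
  simp only [Bool.and_eq_true, Bool.not_eq_true', List.isEmpty_eq_false_iff, List.all_eq_true,
    decide_eq_true_eq] at h
  exact ⟨h.1, h.2⟩

theorem pvFactRepl : ∀ r ∈ pvTableB.map (·.2),
    (r ≠ [] ∧ 128 ≤ r.headI.toNat) ∧ ∀ p ∈ pvTableB, p.1.headI ∉ r := by
  intro r hr
  have h := List.all_eq_true.mp pvFactReplB r hr
  simp only [Bool.and_eq_true, Bool.not_eq_true', List.isEmpty_eq_false_iff, List.all_eq_true,
    decide_eq_true_eq, List.contains_eq_mem, decide_eq_false_iff_not] at h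
  exact ⟨⟨h.1.1, h.1.2⟩, fun p hp => h.2 p hp⟩

theorem pvFactOverlap : ∀ p ∈ pvTableB, ∀ q ∈ pvTableB, ∀ pos < p.1.length,
    1 ≤ pos → ¬ q.1 <+: p.1.drop pos ∧ ¬ p.1.drop pos <+: q.1 := by
  intro p hp q hq pos hpos hpos1
  have h := List.all_eq_true.mp (List.all_eq_true.mp
    (List.all_eq_true.mp pvFactOverlapB p hp) q hq) pos (List.mem_range.mpr hpos)
  simp only [Bool.or_eq_true, beq_iff_eq, Bool.and_eq_true, Bool.not_eq_true'] at h
  rcases h with h | ⟨h1, h2⟩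
  · omega
  · exact ⟨fun hc => by simp [List.isPrefixOf_iff_prefix.mpr hc] at h1,
      fun hc => by simp [List.isPrefixOf_iff_prefix.mpr hc] at h2⟩

-- ---------- rawPrefix lemmas ----------

theorem pvRawPrefix_inl (k : List Char) :
    ∀ s : List Char, pvRawPrefix k (s.map Sum.inl) = true ↔ k <+: s := by
  induction k with
  | nil => intro s; simp [pvRawPrefix]
  | cons c k' ih =>
    intro s
    cases s with
    | nil => simp [pvRawPrefix]
    | cons c' s' =>
      simp only [List.map_cons, pvRawPrefix, Bool.and_eq_true, beq_iff_eq, List.cons_prefix_cons]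
      rw [ih s']

theorem pvRawPrefix_flat (k : List Char) :
    ∀ m : List pvItem, pvRawPrefix k m = true →
      pvFlat m = k ++ pvFlat (pvDropRaw k.length m) := by
  induction k with
  | nil => intro m _; simp [pvDropRaw]
  | cons c k' ih =>
    intro m h
    cases m with
    | nil => simp [pvRawPrefix] at h
    | cons x m' =>
      cases x with
      | inl c' =>
        simp only [pvRawPrefix, Bool.and_eq_true, beq_iff_eq] at h
        obtain ⟨rfl, h2⟩ := h
        simp only [List.length_cons, pvDropRaw, pvFlat, List.flatMap_cons, Sum.elim_inl]
        rw [show (m'.flatMap fun x => Sum.elim (fun c => [c]) id x) = pvFlat m' from rfl,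
            ih m' h2]
        rfl
      | inr b => simp [pvRawPrefix] at h

theorem pvRawPrefix_self_append (k : List Char) (m : List pvItem) :
    pvRawPrefix k (k.map Sum.inl ++ m) = true := by
  induction k with
  | nil => simp [pvRawPrefix]
  | cons c k' ih => simpa [pvRawPrefix]

theorem pvRawPrefix_dec (a : List Char) :
    ∀ (k : List Char) (m : List pvItem), pvRawPrefix k (a.map Sum.inl ++ m) = true →
      k <+: a ∨ (a <+: k ∧ pvRawPrefix (k.drop a.length) m = true) := by
  induction a with
  | nil => intro k m h; right; exact ⟨List.nil_prefix, by simpa using h⟩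
  | cons c a' ih =>
    intro k m h
    cases k with
    | nil => left; exact List.nil_prefix
    | cons d k' =>
      simp only [List.map_cons, List.cons_append, pvRawPrefix, Bool.and_eq_true, beq_iff_eq] at h
      obtain ⟨rfl, h2⟩ := h
      rcases ih k' m h2 with h3 | ⟨h3, h4⟩
      · left; exact List.cons_prefix_cons.mpr ⟨rfl, h3⟩
      · right
        exact ⟨List.cons_prefix_cons.mpr ⟨rfl, h3⟩, by simpa using h4⟩

theorem pvDropRaw_append (a : List Char) (m : List pvItem) :
    pvDropRaw a.length (a.map Sum.inl ++ m) = m := by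
  induction a with
  | nil => simp [pvDropRaw]
  | cons c a' ih => simpa [pvDropRaw]

-- ---------- pvSRepl unfolding lemmas ----------

theorem pvSRepl_nil (k r : List Char) : pvSRepl k r [] = [] := by rw [pvSRepl]

theorem pvSRepl_match (k r : List Char) (m : List pvItem) (hne : k ≠ [])
    (h : pvRawPrefix k m = true) :
    pvSRepl k r m = Sum.inr r :: pvSRepl k r (pvDropRaw k.length m) := by
  cases m with
  | nil =>
    cases k with
    | nil => exact absurd rfl hne
    | cons c k' => simp [pvRawPrefix] at h
  | cons x m' =>
    rw [pvSRepl]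
    simp [hne, h]

theorem pvSRepl_skip (k r : List Char) (x : pvItem) (m : List pvItem)
    (h : pvRawPrefix k (x :: m) = false) :
    pvSRepl k r (x :: m) = x :: pvSRepl k r m := by
  rw [pvSRepl]
  simp [h]

theorem pvSRepl_inr (k r b : List Char) (m : List pvItem) (hne : k ≠ []) :
    pvSRepl k r (Sum.inr b :: m) = Sum.inr b :: pvSRepl k r m := by
  apply pvSRepl_skip
  cases k with
  | nil => exact absurd rfl hne
  | cons c k' => rfl

-- ---------- no raw prefix ⇒ no textual prefix (blocks start non-ASCII) ----------

theorem pvNoRaw_noPrefix :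
    ∀ (m : List pvItem) (k : List Char), k ≠ [] → (∀ c ∈ k, c.toNat < 128) →
      pvGood m → pvRawPrefix k m = false → ¬ k <+: pvFlat m := by
  intro m
  induction m with
  | nil =>
    intro k hne _ _ _ h
    exact hne (List.prefix_nil.mp (by simpa [pvFlat] using h))
  | cons x m' ih =>
    intro k hne hascii hgood hraw hpre
    cases k with
    | nil => exact hne rfl
    | cons c kt =>
      cases x with
      | inl c' =>
        simp only [pvFlat, List.flatMap_cons, Sum.elim_inl, List.singleton_append] at hpre
        obtain ⟨rfl, hpre2⟩ := List.cons_prefix_cons.mp hpre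
        simp only [pvRawPrefix] at hraw
        rw [Bool.and_eq_false_iff] at hraw
        rcases hraw with h1 | h2
        · simp at h1
        · cases kt with
          | nil => simp [pvRawPrefix] at h2
          | cons d kt' =>
            exact ih (d :: kt') (by simp) (fun c hc => hascii c (by simp [hc]))
              (fun r hr => hgood r (by simp [hr])) h2 hpre2
      | inr b =>
        have hb := pvFactRepl b (hgood b (by simp))
        cases b with
        | nil => exact hb.1.1 rfl
        | cons b0 b' =>
          simp only [pvFlat, List.flatMap_cons, Sum.elim_inr, id] at hpre
          have hcb : c = b0 := (List.cons_prefix_cons.mp (by simpa using hpre)).1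
          have hc := hascii c (by simp)
          have h128 : 128 ≤ b0.toNat := hb.1.2
          rw [hcb] at hc
          omega

-- ---------- pvGood preservation ----------

theorem pvGood_dropRaw (n : Nat) (m : List pvItem) (h : pvGood m) : pvGood (pvDropRaw n m) := by
  induction n generalizing m with
  | zero => simpa [pvDropRaw]
  | succ j ih =>
    cases m with
    | nil => simpa [pvDropRaw]
    | cons x m' =>
      simp only [pvDropRaw]
      exact ih m' (fun r hr => h r (by simp [hr]))

theorem pvSRepl_else (k r : List Char) (x : pvItem) (m : List pvItem)
    (h : ¬ (k ≠ [] ∧ pvRawPrefix k (x :: m) = true)) :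
    pvSRepl k r (x :: m) = x :: pvSRepl k r m := by
  rw [pvSRepl, if_neg h]

theorem pvGood_srepl (k r : List Char) (hr : r ∈ pvTableB.map (·.2)) :
    ∀ m : List pvItem, pvGood m → pvGood (pvSRepl k r m) := by
  intro m
  induction m using pvSRepl.induct k with
  | case1 => simp [pvSRepl_nil]
  | case2 x m' hc ih =>
    intro hgood
    rw [pvSRepl_match k r (x :: m') hc.1 hc.2]
    intro r' hr'
    simp only [List.mem_cons, Sum.inr.injEq] at hr'
    rcases hr' with rfl | hr'
    · exact hr
    · exact ih (pvGood_dropRaw _ _ hgood) r' hr'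
  | case3 x m' hc ih =>
    intro hgood
    rw [pvSRepl_else k r x m' hc]
    intro r' hr'
    rcases List.mem_cons.mp hr' with heq | hmem
    · exact hgood r' (by rw [heq]; exact List.mem_cons_self ..)
    · exact ih (fun rr hrr => hgood rr (by simp [hrr])) r' hmem

-- ---------- the central lemma: replace on flat text = srepl on marked text ----------

theorem pvML (k r : List Char) (hk : k ≠ []) (hascii : ∀ c ∈ k, c.toNat < 128)
    (hhead : ∀ b ∈ pvTableB.map (·.2), k.headI ∉ b) :
    ∀ m : List pvItem, pvGood m → pvRepl k r (pvFlat m) = pvFlat (pvSRepl k r m) := by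
  intro m
  induction m using pvSRepl.induct k with
  | case1 => simp [pvSRepl_nil, pvFlat, pvRepl_nil]
  | case2 x m' hc ih =>
    intro hgood
    have hraw := hc.2
    rw [pvSRepl_match k r (x :: m') hk hraw]
    rw [pvRawPrefix_flat k (x :: m') hraw]
    rw [pvRepl_pos k r _ hk (by exact ⟨_, rfl⟩)]
    rw [List.drop_append_of_le_length le_rfl]
    simp only [List.drop_length, List.nil_append]
    rw [ih (pvGood_dropRaw _ _ hgood)]
    rfl
  | case3 x m' hc ih =>
    intro hgood
    have hraw : pvRawPrefix k (x :: m') = false := by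
      rcases Bool.eq_false_or_eq_true (pvRawPrefix k (x :: m')) with h | h
      · exact absurd ⟨hk, h⟩ hc
      · exact h
    rw [pvSRepl_skip k r x m' hraw]
    cases x with
    | inl c =>
      have hgood' : pvGood m' := fun rr hrr => hgood rr (by simp [hrr])
      have : ¬ k <+: pvFlat (Sum.inl c :: m') :=
        pvNoRaw_noPrefix (Sum.inl c :: m') k hk hascii hgood hraw
      simp only [pvFlat, List.flatMap_cons, Sum.elim_inl, List.singleton_append] at this ⊢
      rw [pvRepl_neg k r c _ this]
      rw [show (m'.flatMap fun x => Sum.elim (fun c => [c]) id x) = pvFlat m' from rfl,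
          ih hgood']
      rfl
    | inr b =>
      have hgood' : pvGood m' := fun rr hrr => hgood rr (by simp [hrr])
      have hbmem : b ∈ pvTableB.map (·.2) := hgood b (by simp)
      have hnb : k.headI ∉ b := hhead b hbmem
      simp only [pvFlat, List.flatMap_cons, Sum.elim_inr, id]
      cases k with
      | nil => exact absurd rfl hk
      | cons kh kt =>
        rw [show List.headI (kh :: kt) = kh from rfl] at hnb
        rw [pvRepl_pass kh kt r b _ hnb]
        rw [show (m'.flatMap fun x => Sum.elim (fun c => [c]) id x) = pvFlat m' from rfl,
            ih hgood']
        rfl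

-- ---------- rawPrefix survives srepl backwards ----------

theorem pvRaw_srepl (k r : List Char) :
    ∀ (m : List pvItem) (kk : List Char),
      pvRawPrefix kk (pvSRepl k r m) = true → pvRawPrefix kk m = true := by
  intro m
  induction m using pvSRepl.induct k with
  | case1 => intro kk h; simpa [pvSRepl_nil] using h
  | case2 x m' hc ih =>
    intro kk h
    rw [pvSRepl_match k r (x :: m') hc.1 hc.2] at h
    cases kk with
    | nil => rfl
    | cons c kt => simp [pvRawPrefix] at h
  | case3 x m' hc ih =>
    intro kk h
    rw [pvSRepl_else k r x m' hc] at h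
    cases kk with
    | nil => rfl
    | cons c kt =>
      cases x with
      | inl c' =>
        simp only [pvRawPrefix, Bool.and_eq_true, beq_iff_eq] at h ⊢
        exact ⟨h.1, ih kt h.2⟩
      | inr b => simp [pvRawPrefix] at h

theorem pvReflects_srepl (t k r : List Char) (m : List pvItem)
    (h : pvReflects t m) : pvReflects t (pvSRepl k r m) :=
  fun kk hkk => h kk (pvRaw_srepl k r m kk hkk)

theorem pvReflects_inl (t : List Char) : pvReflects t (t.map Sum.inl) :=
  fun kk hkk => (pvRawPrefix_inl kk t).mp hkk

theorem pvGood_inl (s : List Char) : pvGood (s.map Sum.inl) := by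
  intro r hr
  simp [List.mem_map] at hr

-- ---------- srepl passes an untouched raw region ----------

theorem pvPassR (k r : List Char) :
    ∀ (a : List Char) (m : List pvItem),
      (∀ pos < a.length, pvRawPrefix k ((a.drop pos).map Sum.inl ++ m) = false) →
      pvSRepl k r (a.map Sum.inl ++ m) = a.map Sum.inl ++ pvSRepl k r m := by
  intro a
  induction a with
  | nil => simp
  | cons c a' ih =>
    intro m hcond
    have h0 : pvRawPrefix k (Sum.inl c :: (a'.map Sum.inl ++ m)) = false := by
      have := hcond 0 (by simp)
      simpa using this
    rw [List.map_cons, List.cons_append, pvSRepl_skip k r _ _ h0]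
    rw [ih m (fun pos hpos => by
      have := hcond (pos + 1) (by simpa using Nat.succ_lt_succ hpos)
      simpa using this)]
    rw [List.cons_append]

-- ---------- region preservation for one non-matching key ----------

theorem pvSL (p : List Char × List Char) (hp : p ∈ pvTableB)
    (pi : List Char × List Char) (hpi : pi ∈ pvTableB)
    (t : List Char) (hq : ¬ p.1 <+: (pi.1 ++ t))
    (m : List pvItem) (hrefl : pvReflects t m) :
    pvSRepl p.1 p.2 (pi.1.map Sum.inl ++ m) = pi.1.map Sum.inl ++ pvSRepl p.1 p.2 m := by
  apply pvPassR p.1 p.2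
  intro pos hpos
  rcases Bool.eq_false_or_eq_true (pvRawPrefix p.1 ((pi.1.drop pos).map Sum.inl ++ m)) with h | h
  swap
  · exact h
  exfalso
  rcases pvRawPrefix_dec (pi.1.drop pos) p.1 m h with h1 | ⟨h1, h2⟩
  · rcases Nat.eq_zero_or_pos pos with rfl | hpos1
    · simp only [List.drop_zero] at h1
      exact hq (h1.trans (List.prefix_append _ _))
    · exact (pvFactOverlap pi hpi p hp pos hpos hpos1).1 h1
  · rcases Nat.eq_zero_or_pos pos with rfl | hpos1
    · simp only [List.drop_zero] at h1 h2
      have hext : p.1.drop pi.1.length <+: t := hrefl _ h2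
      obtain ⟨u, hu⟩ := hext
      obtain ⟨v, hv⟩ := h1
      apply hq
      refine ⟨u, ?_⟩
      conv_lhs => rw [← hv]
      rw [← hu]
      rw [← hv]
      simp
    · exact (pvFactOverlap pi hpi p hp pos hpos hpos1).2 h1

-- fold of a non-matching key list passes an untouched raw region
theorem pvFP1 (pi : List Char × List Char) (hpi : pi ∈ pvTableB) (t : List Char) :
    ∀ (T1 : List (List Char × List Char)),
      (∀ q ∈ T1, q ∈ pvTableB ∧ ¬ q.1 <+: (pi.1 ++ t)) →
      ∀ m : List pvItem, pvGood m → pvReflects t m →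
      pvFoldS T1 (pi.1.map Sum.inl ++ m) = pi.1.map Sum.inl ++ pvFoldS T1 m := by
  intro T1
  induction T1 with
  | nil => intro _ m _ _; simp [pvFoldS]
  | cons q T1' ih =>
    intro hT m hgood hrefl
    have hq := hT q (by simp)
    simp only [pvFoldS, List.foldl_cons]
    rw [pvSL q hq.1 pi hpi t hq.2 m hrefl]
    exact ih (fun q' hq' => hT q' (by simp [hq'])) _
      (pvGood_srepl q.1 q.2 (List.mem_map.mpr ⟨q, hq.1, rfl⟩) m hgood)
      (pvReflects_srepl t q.1 q.2 m hrefl)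

-- fold passes an inert block at the head
theorem pvFoldS_inr (b : List Char) :
    ∀ (T : List (List Char × List Char)), (∀ q ∈ T, q.1 ≠ []) →
      ∀ m, pvFoldS T (Sum.inr b :: m) = Sum.inr b :: pvFoldS T m := by
  intro T
  induction T with
  | nil => intro _ m; simp [pvFoldS]
  | cons q T' ih =>
    intro hT m
    simp only [pvFoldS, List.foldl_cons]
    rw [pvSRepl_inr q.1 q.2 b m (hT q (by simp))]
    exact ih (fun q' hq' => hT q' (by simp [hq'])) _

-- fold passes one raw char no key matches at
theorem pvFP0 (c : Char) (t : List Char) :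
    ∀ (T : List (List Char × List Char)),
      (∀ q ∈ T, q ∈ pvTableB ∧ ¬ q.1 <+: (c :: t)) →
      ∀ m : List pvItem, pvReflects t m →
      pvFoldS T (Sum.inl c :: m) = Sum.inl c :: pvFoldS T m := by
  intro T
  induction T with
  | nil => intro _ m _; simp [pvFoldS]
  | cons q T' ih =>
    intro hT m hrefl
    have hq := hT q (by simp)
    have hraw : pvRawPrefix q.1 (Sum.inl c :: m) = false := by
      rcases Bool.eq_false_or_eq_true (pvRawPrefix q.1 (Sum.inl c :: m)) with h | h
      swap
      · exact h
      exfalso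
      cases hk : q.1 with
      | nil => exact (pvFactKey q hq.1).1 hk
      | cons d kt =>
        rw [hk] at h
        simp only [pvRawPrefix, Bool.and_eq_true, beq_iff_eq] at h
        obtain ⟨rfl, h2⟩ := h
        have : kt <+: t := hrefl kt h2
        exact hq.2 (by rw [hk]; exact List.cons_prefix_cons.mpr ⟨rfl, this⟩)
    simp only [pvFoldS, List.foldl_cons]
    rw [pvSRepl_skip q.1 q.2 _ m hraw]
    exact ih (fun q' hq' => hT q' (by simp [hq'])) _ (pvReflects_srepl t q.1 q.2 m hrefl)

-- ---------- the bridge: marked fold of the whole table = the single-pass scan ----------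

theorem pvFlat_inl (s : List Char) : pvFlat (s.map Sum.inl) = s := by
  induction s with
  | nil => rfl
  | cons c t ih => simp [pvFlat, List.flatMap_cons] at ih ⊢; exact ih

theorem pvScanB_nil : pvScanB [] = [] := by rw [pvScanB]

theorem pvScanB_some (c : Char) (t : List Char) (p : List Char × List Char)
    (h : pvTableB.find? (fun p => p.1.isPrefixOf (c :: t)) = some p) :
    pvScanB (c :: t) = p.2 ++ pvScanB ((c :: t).drop p.1.length) := by
  rw [pvScanB]
  split
  · rename_i p' h'
    rw [h] at h'
    cases h'
    rfl
  · rename_i h'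
    rw [h] at h'
    cases h'

theorem pvScanB_none (c : Char) (t : List Char)
    (h : pvTableB.find? (fun p => p.1.isPrefixOf (c :: t)) = none) :
    pvScanB (c :: t) = c :: pvScanB t := by
  rw [pvScanB]
  split
  · rename_i p' h'
    rw [h] at h'
    cases h'
  · rfl

theorem pvBT : ∀ (n : Nat) (s : List Char), s.length ≤ n →
    pvFlat (pvFoldS pvTableB (s.map Sum.inl)) = pvScanB s := by
  intro n
  induction n with
  | zero =>
    intro s hs
    have : s = [] := List.eq_nil_of_length_eq_zero (Nat.le_zero.mp hs)
    subst this
    simp [pvScanB_nil, pvFoldS, pvFlat]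
    induction pvTableB with
    | nil => simp
    | cons q T ih => simpa [pvSRepl_nil] using ih
  | succ N ih =>
    intro s hs
    cases s with
    | nil =>
      simp [pvScanB_nil, pvFoldS, pvFlat]
      induction pvTableB with
      | nil => simp
      | cons q T ihh => simpa [pvSRepl_nil] using ihh
    | cons c t =>
      cases hfind : pvTableB.find? (fun p => p.1.isPrefixOf (c :: t)) with
      | none =>
        have hall : ∀ q ∈ pvTableB, q ∈ pvTableB ∧ ¬ q.1 <+: (c :: t) := by
          intro q hq
          refine ⟨hq, fun hpre => ?_⟩
          have := List.find?_eq_none.mp hfind q hq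
          simp [List.isPrefixOf_iff_prefix.mpr hpre] at this
        rw [show ((c :: t).map Sum.inl) = Sum.inl c :: t.map Sum.inl from rfl]
        rw [pvFP0 c t pvTableB hall (t.map Sum.inl) (pvReflects_inl t)]
        simp only [pvFlat, List.flatMap_cons, Sum.elim_inl, List.singleton_append]
        rw [show ((pvFoldS pvTableB (t.map Sum.inl)).flatMap fun x => Sum.elim (fun c => [c]) id x)
              = pvFlat (pvFoldS pvTableB (t.map Sum.inl)) from rfl]
        rw [ih t (by simp at hs; omega)]
        rw [pvScanB_none c t hfind]
      | some p =>
        obtain ⟨hps, T1, T2, hsplit, hT1⟩ := List.find?_eq_some_iff_append.mp hfind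
        have hpmem : p ∈ pvTableB := List.mem_of_find?_eq_some hfind
        have hppre : p.1 <+: (c :: t) := List.isPrefixOf_iff_prefix.mp hps
        obtain ⟨t', ht'⟩ := hppre
        have hkne : p.1 ≠ [] := (pvFactKey p hpmem).1
        -- s = p.1 ++ t'
        have hT1' : ∀ q ∈ T1, q ∈ pvTableB ∧ ¬ q.1 <+: (p.1 ++ t') := by
          intro q hq
          refine ⟨by rw [hsplit]; simp [hq], fun hpre => ?_⟩
          have := hT1 q hq
          rw [← ht'] at this
          simp [List.isPrefixOf_iff_prefix.mpr hpre] at this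
        have hsplitF : pvFoldS pvTableB ((c :: t).map Sum.inl)
            = pvFoldS T2 (pvSRepl p.1 p.2 (pvFoldS T1 ((c :: t).map Sum.inl))) := by
          rw [hsplit]
          simp [pvFoldS, List.foldl_append]
        rw [hsplitF]
        rw [show ((c :: t).map Sum.inl) = p.1.map Sum.inl ++ t'.map Sum.inl by
          rw [← List.map_append, ht']]
        rw [pvFP1 p hpmem t' T1 hT1' (t'.map Sum.inl) (pvGood_inl t') (pvReflects_inl t')]
        rw [pvSRepl_match p.1 p.2 _ hkne (pvRawPrefix_self_append p.1 _)]
        rw [pvDropRaw_append p.1 _]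
        rw [pvFoldS_inr p.2 T2 (fun q hq => (pvFactKey q (by rw [hsplit]; simp [hq])).1) _]
        simp only [pvFlat, List.flatMap_cons, Sum.elim_inr, id]
        rw [show (pvFoldS T2 (pvSRepl p.1 p.2 (pvFoldS T1 (t'.map Sum.inl)))) = pvFoldS pvTableB (t'.map Sum.inl) by
          rw [hsplit]; simp [pvFoldS, List.foldl_append]]
        rw [show ((pvFoldS pvTableB (t'.map Sum.inl)).flatMap fun x => Sum.elim (fun c => [c]) id x)
              = pvFlat (pvFoldS pvTableB (t'.map Sum.inl)) from rfl]
        have hlen : t'.length ≤ N := by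
          have : (c :: t).length = p.1.length + t'.length := by rw [← ht']; simp
          have h1 : 1 ≤ p.1.length := by
            cases ho : p.1 with
            | nil => exact absurd ho hkne
            | cons a l => simp
          simp at hs this
          omega
        rw [ih t' hlen]
        rw [pvScanB_some c t p hfind, ← ht']
        rw [List.drop_append_of_le_length le_rfl]
        simp

-- ---------- chain of replaces = marked fold ----------

theorem pvCH : ∀ (T : List (List Char × List Char)), (∀ q ∈ T, q ∈ pvTableB) →
    ∀ m : List pvItem, pvGood m →
      T.foldl (fun d p => PySem.Chars.replace d p.1 p.2) (pvFlat m) = pvFlat (pvFoldS T m) := by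
  intro T
  induction T with
  | nil => intro _ m _; simp [pvFoldS]
  | cons q T' ih =>
    intro hT m hgood
    have hq := hT q (by simp)
    have hkne := (pvFactKey q hq).1
    simp only [List.foldl_cons, pvFoldS]
    rw [pvRepl_eq_replace q.1 q.2 _ hkne]
    rw [pvML q.1 q.2 hkne (pvFactKey q hq).2 (fun b hb => (pvFactRepl b hb).2 q hq) m hgood]
    exact ih (fun q' hq' => hT q' (by simp [hq'])) _
      (pvGood_srepl q.1 q.2 (List.mem_map.mpr ⟨q, hq, rfl⟩) m hgood)

-- ---------- string-level assembly ----------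



theorem pvStrFold : ∀ (L : List (String × String)) (x : String),
    (L.foldl (fun d p => PySem.Str.replace d p.1 p.2) x).toList
      = (L.map (fun p => (p.1.toList, p.2.toList))).foldl
          (fun d p => PySem.Chars.replace d p.1 p.2) x.toList := by
  intro L
  induction L with
  | nil => intro x; simp
  | cons q L' ih =>
    intro x
    simp only [List.foldl_cons, List.map_cons]
    rw [ih]
    simp

theorem pvCore (name : String) :
    ((PySem.Dict.ofList
    [ (("Upper Body" : String), ("По пояс" : String)),
      ("Office Front", "Офис, анфас"),
      ("Office Side", "Офис, сбоку"),
      ("Sofa Front", "На диване, анфас"),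
      ("Sofa Side", "На диване, сбоку"),
      ("in Brown blazer", "в коричневом пиджаке"),
      ("in Blue blazer", "в синем пиджаке"),
      ("in Beige blazer", "в бежевом пиджаке"),
      ("in Black blazer", "в черном пиджаке"),
      ("in Blue shirt", "в синей рубашке"),
      ("in White shirt", "в белой рубашке"),
      ("in Black shirt", "в черной рубашке"),
      ("in Blue t-shirt", "в синей футболке"),
      ("in Black t-shirt", "в черной футболке"),
      ("in White t-shirt", "в белой футболке"),
      ("in Grey t-shirt", "в серой футболке"),
      ("in Grey sweater", "в сером свитере"),
      ("in Black sweater", "в черном свитере") ]).items.foldl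
        (fun d p => PySem.Str.replace d p.1 p.2) name)
    = String.ofList (pvScanB name.toList) := by
  apply String.toList_inj.mp
  rw [pvStrFold]
  have hitems : (PySem.Dict.ofList
    [ (("Upper Body" : String), ("По пояс" : String)),
      ("Office Front", "Офис, анфас"),
      ("Office Side", "Офис, сбоку"),
      ("Sofa Front", "На диване, анфас"),
      ("Sofa Side", "На диване, сбоку"),
      ("in Brown blazer", "в коричневом пиджаке"),
      ("in Blue blazer", "в синем пиджаке"),
      ("in Beige blazer", "в бежевом пиджаке"),
      ("in Black blazer", "в черном пиджаке"),
      ("in Blue shirt", "в синей рубашке"),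
      ("in White shirt", "в белой рубашке"),
      ("in Black shirt", "в черной рубашке"),
      ("in Blue t-shirt", "в синей футболке"),
      ("in Black t-shirt", "в черной футболке"),
      ("in White t-shirt", "в белой футболке"),
      ("in Grey t-shirt", "в серой футболке"),
      ("in Grey sweater", "в сером свитере"),
      ("in Black sweater", "в черном свитере") ]).items
      = [ (("Upper Body" : String), ("По пояс" : String)),
      ("Office Front", "Офис, анфас"),
      ("Office Side", "Офис, сбоку"),
      ("Sofa Front", "На диване, анфас"),
      ("Sofa Side", "На диване, сбоку"),
      ("in Brown blazer", "в коричневом пиджаке"),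
      ("in Blue blazer", "в синем пиджаке"),
      ("in Beige blazer", "в бежевом пиджаке"),
      ("in Black blazer", "в черном пиджаке"),
      ("in Blue shirt", "в синей рубашке"),
      ("in White shirt", "в белой рубашке"),
      ("in Black shirt", "в черной рубашке"),
      ("in Blue t-shirt", "в синей футболке"),
      ("in Black t-shirt", "в черной футболке"),
      ("in White t-shirt", "в белой футболке"),
      ("in Grey t-shirt", "в серой футболке"),
      ("in Grey sweater", "в сером свитере"),
      ("in Black sweater", "в черном свитере") ] := by decide
  rw [hitems]
  have hmap : ([ (("Upper Body" : String), ("По пояс" : String)),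
      ("Office Front", "Офис, анфас"),
      ("Office Side", "Офис, сбоку"),
      ("Sofa Front", "На диване, анфас"),
      ("Sofa Side", "На диване, сбоку"),
      ("in Brown blazer", "в коричневом пиджаке"),
      ("in Blue blazer", "в синем пиджаке"),
      ("in Beige blazer", "в бежевом пиджаке"),
      ("in Black blazer", "в черном пиджаке"),
      ("in Blue shirt", "в синей рубашке"),
      ("in White shirt", "в белой рубашке"),
      ("in Black shirt", "в черной рубашке"),
      ("in Blue t-shirt", "в синей футболке"),
      ("in Black t-shirt", "в черной футболке"),
      ("in White t-shirt", "в белой футболке"),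
      ("in Grey t-shirt", "в серой футболке"),
      ("in Grey sweater", "в сером свитере"),
      ("in Black sweater", "в черном свитере") ].map
        (fun p : String × String => (p.1.toList, p.2.toList))) = pvTableB := by
    simp [pvTableB]
  rw [hmap]
  have := pvCH pvTableB (fun q hq => hq) (name.toList.map Sum.inl) (pvGood_inl name.toList)
  rw [pvFlat_inl] at this
  rw [this]
  rw [pvBT name.toList.length name.toList le_rfl]
  simp

set_option maxRecDepth 8192 in
theorem translate_avatar_name_spec : Claim_equal_translate_avatar_name := by
  intro name gender _
  unfold Spec_translate_avatar_name
  unfold translate_avatar_name translate_avatar_name_alt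
  simp only []
  rw [pvCore name]
  generalize (PySem.Str.strip (PySem.Str.replace
    (PySem.Str.replace (String.ofList (pvScanB name.toList)) "(" "") ")" "")) = d
  generalize (PySem.Str.splitMax? d " " 1).getD [] = parts
  rcases parts with _ | ⟨a, _ | ⟨b, rest⟩⟩
  · simp
  · simp
  · simp [List.getD]
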